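-- pv_equiv track=rewrite | github.com/edac713/Image-To-Website | img2code/scripts/ui_grid_segmenter.py | calculate_whitespace_and_merge_segments
-- ===== SOURCE A (Python) =====
-- def calculate_whitespace_and_merge_segments(image, boundaries, whitespace_threshold):
--     merged_segments = []
--     prev_end = 0
--     for start, end in boundaries:
--         if start - prev_end <= whitespace_threshold:
--             if merged_segments:
--                 merged_segments[-1] = (merged_segments[-1][0], end)
--             else:
--                 merged_segments.append((start, end))
--         else:
--             merged_segments.append((start, end))
--         prev_end = end
--     return merged_segments
-- ===== SOURCE B (Python) =====
-- def calculate_whitespace_and_merge_segments(image, boundaries, whitespace_threshold):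
--     # Group-by over adjacent boundaries: for each group start, scan forward to
--     # the end of its run of small gaps and emit one merged segment.
--     out = []
--     k = 0
--     n = len(boundaries)
--     while k < n:
--         start = boundaries[k][0]
--         j = k
--         while j + 1 < n and boundaries[j + 1][0] - boundaries[j][1] <= whitespace_threshold:
--             j += 1
--         out.append((start, boundaries[j][1]))
--         k = j + 1
--     return out
-- ===== Notes on version B (the rewrite author's own statement) =====
-- stated objective: alternative
-- what changed: B replaces A's accumulator that mutates the last emitted segment with an explicit group-by: it scans forward to the end of each run of small gaps and emits one merged segment per run.
import Mathlib
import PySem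

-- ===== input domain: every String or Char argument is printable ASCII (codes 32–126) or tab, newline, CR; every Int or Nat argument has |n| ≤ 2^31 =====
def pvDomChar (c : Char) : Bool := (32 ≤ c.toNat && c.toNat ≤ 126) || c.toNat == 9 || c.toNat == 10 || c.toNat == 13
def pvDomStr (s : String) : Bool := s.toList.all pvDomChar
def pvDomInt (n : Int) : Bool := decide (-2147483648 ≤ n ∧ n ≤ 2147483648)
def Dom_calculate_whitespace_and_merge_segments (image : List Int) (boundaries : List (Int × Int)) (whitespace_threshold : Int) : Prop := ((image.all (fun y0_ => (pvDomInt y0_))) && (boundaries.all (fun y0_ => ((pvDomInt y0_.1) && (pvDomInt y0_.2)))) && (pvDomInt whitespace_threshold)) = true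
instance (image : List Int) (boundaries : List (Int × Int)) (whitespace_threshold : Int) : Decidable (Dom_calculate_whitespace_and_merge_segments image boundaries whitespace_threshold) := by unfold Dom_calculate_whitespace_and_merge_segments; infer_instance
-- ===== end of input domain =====

-- ===== PORT A =====
-- B differs from A by an explicit group-by over runs of small gaps (alternative decomposition, same cost).
-- merged_segments[-1] = (merged_segments[-1][0], end)
def aSetLast (xs : List (Int × Int)) (e : Int) : List (Int × Int) :=
  match xs with
  | [] => []
  | [p] => [(p.1, e)]
  | p :: r => p :: aSetLast r e

def aLoop (acc : List (Int × Int)) (prev_end : Int) (bs : List (Int × Int)) (t : Int) : List (Int × Int) :=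
  match bs with
  | [] => acc
  | (s, e) :: rest =>
    if s - prev_end ≤ t then
      match acc with
      | [] => aLoop (acc ++ [(s, e)]) e rest t
      | _ :: _ => aLoop (aSetLast acc e) e rest t
    else
      aLoop (acc ++ [(s, e)]) e rest t

def calculate_whitespace_and_merge_segments (image : List Int) (boundaries : List (Int × Int)) (whitespace_threshold : Int) : List (Int × Int) :=
  aLoop [] 0 boundaries whitespace_threshold

-- ===== PORT B =====
-- inner while loop: extend the current run while the next gap is small;
-- returns the run's end value and the remaining boundaries
def bRun (t e : Int) (rest : List (Int × Int)) : Int × List (Int × Int) :=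
  match rest with
  | [] => (e, [])
  | (s2, e2) :: r => if s2 - e ≤ t then bRun t e2 r else (e, (s2, e2) :: r)

theorem bRun_len (t e : Int) (rest : List (Int × Int)) : (bRun t e rest).2.length ≤ rest.length := by
  induction rest generalizing e with
  | nil => simp [bRun]
  | cons p r ih =>
    obtain ⟨s2, e2⟩ := p
    simp only [bRun]
    split
    · exact le_trans (ih e2) (by simp)
    · simp

-- outer while loop: one merged segment per run
def bMain (t : Int) (bs : List (Int × Int)) : List (Int × Int) :=
  match bs with
  | [] => []
  | (s, e) :: r =>
    (s, (bRun t e r).1) :: bMain t (bRun t e r).2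
termination_by bs.length
decreasing_by
  exact Nat.lt_succ_of_le (bRun_len t e r)

def calculate_whitespace_and_merge_segments_alt (image : List Int) (boundaries : List (Int × Int)) (whitespace_threshold : Int) : List (Int × Int) :=
  bMain whitespace_threshold boundaries
-- ===== PRECONDITION & SPEC =====
def Spec_calculate_whitespace_and_merge_segments (image : List Int) (boundaries : List (Int × Int)) (whitespace_threshold : Int) (out : List (Int × Int)) : Prop := out = calculate_whitespace_and_merge_segments_alt image boundaries whitespace_threshold
instance (image : List Int) (boundaries : List (Int × Int)) (whitespace_threshold : Int) (out : List (Int × Int)) : Decidable (Spec_calculate_whitespace_and_merge_segments image boundaries whitespace_threshold out) := by unfold Spec_calculate_whitespace_and_merge_segments; infer_instance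

-- ===== CLAIM (what is proved, stated in full; the proofs are below) =====
def Claim_equal_calculate_whitespace_and_merge_segments : Prop := ∀ (image : List Int) (boundaries : List (Int × Int)) (whitespace_threshold : Int), Dom_calculate_whitespace_and_merge_segments image boundaries whitespace_threshold → Spec_calculate_whitespace_and_merge_segments image boundaries whitespace_threshold (calculate_whitespace_and_merge_segments image boundaries whitespace_threshold)


-- ===== LEMMAS AND PROOFS (helpers) =====
theorem setLast_append (init : List (Int × Int)) (s e e2 : Int) :
    aSetLast (init ++ [(s, e)]) e2 = init ++ [(s, e2)] := by
  induction init with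
  | nil => simp [aSetLast]
  | cons p r ih =>
    cases r with
    | nil => simp [aSetLast]
    | cons q r2 => simpa [aSetLast] using ih

theorem aLoop_eq (t : Int) (bs : List (Int × Int)) :
    ∀ (init : List (Int × Int)) (s e : Int),
      aLoop (init ++ [(s, e)]) e bs t =
        init ++ ((s, (bRun t e bs).1) :: bMain t (bRun t e bs).2) := by
  induction bs with
  | nil => intro init s e; simp [aLoop, bRun, bMain]
  | cons p r ih =>
    intro init s e
    obtain ⟨s2, e2⟩ := p
    by_cases h : s2 - e ≤ t
    · have hacc : init ++ [(s, e)] ≠ [] := by simp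
      rw [show aLoop (init ++ [(s, e)]) e ((s2, e2) :: r) t
            = aLoop (aSetLast (init ++ [(s, e)]) e2) e2 r t by
          cases hinit : init ++ [(s, e)] with
          | nil => exact absurd hinit hacc
          | cons q qs => simp [aLoop, h, ← hinit]]
      rw [setLast_append, ih init s e2]
      simp [bRun, h]
    · have : aLoop (init ++ [(s, e)]) e ((s2, e2) :: r) t
          = aLoop ((init ++ [(s, e)]) ++ [(s2, e2)]) e2 r t := by
        cases hinit : init ++ [(s, e)] with
        | nil => simp at hinit
        | cons q qs => simp [aLoop, h, ← hinit]
      rw [this, ih (init ++ [(s, e)]) s2 e2]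
      simp [bRun, h, bMain]

-- ===== VERDICT (by name: the statement is the Claim_ definition above) =====
theorem calculate_whitespace_and_merge_segments_spec : Claim_equal_calculate_whitespace_and_merge_segments := by
  intro image boundaries t _
  show calculate_whitespace_and_merge_segments image boundaries t = calculate_whitespace_and_merge_segments_alt image boundaries t
  unfold calculate_whitespace_and_merge_segments calculate_whitespace_and_merge_segments_alt
  cases boundaries with
  | nil => simp [aLoop, bMain]
  | cons p r =>
    obtain ⟨s, e⟩ := p
    have h1 : aLoop [] 0 ((s, e) :: r) t = aLoop [(s, e)] e r t := by
      by_cases h : s - 0 ≤ t <;> simp [aLoop, h]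
    rw [h1, show ([(s, e)] : List (Int × Int)) = [] ++ [(s, e)] by simp, aLoop_eq t r [] s e]
    simp [bMain]
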